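-- pv_equiv track=rewrite | github.com/shishmarevv/balda | main.py | check
-- ===== SOURCE A (Python) =====
-- def check(words, input_word):
--     button = 0
--     input_word.replace('\n', '')
--     for word in words:
--         if (word[:len(input_word)] == input_word) and not(input_word == word):
--             button = 2
--         if input_word == word:
--             button = 1
--             break
--     return button
-- ===== SOURCE B (Python) =====
-- def check(words, input_word):
--     if input_word in words:
--         return 1
--     if any(word.startswith(input_word) and word != input_word for word in words):
--         return 2
--     return 0
-- ===== Notes on version B (the rewrite author's own statement) =====
-- stated objective: simpler
-- what changed: Replaces the single coupled loop with a mutable flag and break by two independent scans: a membership test for the exact match, then an any() over startswith for the proper-prefix case.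
import Mathlib
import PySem

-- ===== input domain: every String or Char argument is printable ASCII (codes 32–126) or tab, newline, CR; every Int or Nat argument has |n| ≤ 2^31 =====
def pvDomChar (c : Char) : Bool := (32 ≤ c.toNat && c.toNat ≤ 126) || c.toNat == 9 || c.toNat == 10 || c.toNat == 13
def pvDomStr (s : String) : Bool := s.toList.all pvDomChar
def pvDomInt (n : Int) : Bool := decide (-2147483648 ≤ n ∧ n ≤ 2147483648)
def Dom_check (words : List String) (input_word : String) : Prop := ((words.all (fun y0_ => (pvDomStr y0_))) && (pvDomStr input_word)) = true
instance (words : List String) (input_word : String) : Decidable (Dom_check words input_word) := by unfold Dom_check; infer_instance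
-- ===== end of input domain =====

-- B replaces A's single flag-and-break loop by two independent scans (membership, then any-startswith): simpler.
-- ===== PORT A =====
-- loop of A: 'button' accumulator; exact match breaks with 1
def checkGo (input_word : String) : List String → Int → Int
  | [], button => button
  | word :: rest, button =>
    let button := if PySem.Str.slice word none (some (PySem.Str.len input_word)) == input_word && !(input_word == word) then 2 else button
    if input_word == word then 1 else checkGo input_word rest button

def check (words : List String) (input_word : String) : Int :=
  checkGo input_word words 0

-- ===== PORT B =====
def check_alt (words : List String) (input_word : String) : Int :=
  if words.contains input_word then 1
  else if words.any (fun word => PySem.Str.startswith word input_word && word != input_word) then 2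
  else 0

-- ===== PRECONDITION & SPEC =====
def Spec_check (words : List String) (input_word : String) (out : Int) : Prop := out = check_alt words input_word
instance (words : List String) (input_word : String) (out : Int) : Decidable (Spec_check words input_word out) := by unfold Spec_check; infer_instance

-- ===== CLAIM (what is proved, stated in full; the proofs are below) =====
def Claim_equal_check : Prop := ∀ (words : List String) (input_word : String), Dom_check words input_word → Spec_check words input_word (check words input_word)

-- ===== LEMMAS AND PROOFS =====

-- ===== VERDICT (by name: the statement is the Claim_ definition above) =====
-- the per-word test of A equals B's
lemma if2_aux (p q : Bool) (b : Int) :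
    (if q = true then 2 else if p = true then 2 else b)
      = (if (p || q) = true then 2 else b) := by
  cases p <;> cases q <;> simp

lemma toList_take_len (w inp : String) :
    (PySem.Str.slice w none (some (PySem.Str.len inp))).toList
      = w.toList.take inp.toList.length := by
  rw [PySem.Str.toList_slice, PySem.Chars.slice_eq_listSlice, PySem.Str.len_eq,
    PySem.List.slice_to_natCast]

lemma slice_beq_eq (w inp : String) :
    (PySem.Str.slice w none (some (PySem.Str.len inp)) == inp)
      = PySem.Str.startswith w inp := by
  rw [Bool.eq_iff_iff, beq_iff_eq, PySem.Str.startswith_eq, PySem.Chars.startswith_iff,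
    List.prefix_iff_eq_take]
  constructor
  · intro h
    rw [← h, toList_take_len]
    simp
  · intro h
    have ht : (PySem.Str.slice w none (some (PySem.Str.len inp))).toList = inp.toList := by
      rw [toList_take_len, ← h]
    exact String.toList_injective ht

lemma test_eq (w inp : String) :
    (PySem.Str.slice w none (some (PySem.Str.len inp)) == inp && !(inp == w))
      = (PySem.Str.startswith w inp && w != inp) := by
  rw [slice_beq_eq]
  congr 1
  by_cases h : inp = w
  · subst h; simp
  · have h1 : (inp == w) = false := beq_eq_false_iff_ne.mpr h
    have h2 : (w != inp) = true := bne_iff_ne.mpr (Ne.symm h)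
    rw [h1, h2]
    simp

lemma go_eq (inp : String) (ws : List String) (b : Int) :
    checkGo inp ws b =
      if inp ∈ ws then 1
      else if ws.any (fun w => PySem.Str.startswith w inp && w != inp) then 2
      else b := by
  induction ws generalizing b with
  | nil => simp [checkGo]
  | cons w ws ih =>
    by_cases he : inp = w
    · subst he
      simp [checkGo]
    · rw [checkGo]
      simp only [test_eq]
      rw [if_neg (by simp [he]), ih]
      simp only [List.mem_cons, List.any_cons, he, false_or]
      by_cases hm : inp ∈ ws
      · simp [hm]
      · rw [if_neg hm, if_neg hm]
        exact if2_aux _ _ b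

theorem check_spec : Claim_equal_check := by
  intro words input_word _
  unfold Spec_check check check_alt
  rw [go_eq]
  by_cases h : input_word ∈ words
  · simp [h]
  · simp [h]
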